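-- pv_equiv track=rewrite | github.com/bhagavansprasad/students | bhagavan/ds-problems/hkrk/11-Ways-to-give-a-check-M/sol-ways-to-give-a-check-English.py | get_left_down_positions
-- ===== SOURCE A (Python) =====
-- def get_left_down_positions(row, col):
-- 	tlist = []
-- 	while(1):
-- 		if (row < 1 or col < 1):
-- 			break
--
-- 		tlist.append((row, col))
-- 		row = row - 1
-- 		col = col - 1
--
-- 	return tlist
-- ===== SOURCE B (Python) =====
-- def get_left_down_positions(row, col):
--     if row < 1 or col < 1:
--         return []
--     # Jump straight to the bottom end of the diagonal, then walk back up-right,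
--     # collecting cells in ascending order, and reverse at the end.
--     n = min(row, col)
--     r, c = row - n + 1, col - n + 1
--     asc = []
--     while r <= row:
--         asc.append((r, c))
--         r += 1
--         c += 1
--     asc.reverse()
--     return asc
-- ===== Notes on version B (the rewrite author's own statement) =====
-- stated objective: alternative
-- what changed: Instead of A's decrement-and-break walk from (row,col) downward, B jumps directly to the bottom end of the diagonal and walks it upward with increments, building the list in ascending order and reversing it at the end.
import Mathlib
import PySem

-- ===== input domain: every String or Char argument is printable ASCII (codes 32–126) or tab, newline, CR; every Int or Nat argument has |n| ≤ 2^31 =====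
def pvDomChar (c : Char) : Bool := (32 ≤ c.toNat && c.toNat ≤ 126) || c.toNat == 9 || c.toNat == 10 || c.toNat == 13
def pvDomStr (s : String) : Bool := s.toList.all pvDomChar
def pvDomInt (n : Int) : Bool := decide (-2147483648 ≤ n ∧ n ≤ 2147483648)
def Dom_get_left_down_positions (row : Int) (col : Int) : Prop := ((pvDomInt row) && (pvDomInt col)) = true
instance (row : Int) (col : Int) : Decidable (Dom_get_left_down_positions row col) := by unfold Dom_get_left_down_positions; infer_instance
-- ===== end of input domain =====

-- B walks the diagonal from its bottom end upward (increments, ascending order)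
-- and reverses, instead of A's decrement-and-break walk; objective: alternative.

-- ===== PORT A =====
-- A's while loop: append (row,col) then decrement both until one drops below 1.
def get_left_down_positions (row : Int) (col : Int) : List (Int × Int) :=
  if row < 1 ∨ col < 1 then []
  else (row, col) :: get_left_down_positions (row - 1) (col - 1)
termination_by (min row col).toNat
decreasing_by omega

-- ===== PORT B =====
-- B's upward walk: while r ≤ row, append (r,c) and increment both.
def gldAsc (row : Int) (r c : Int) (acc : List (Int × Int)) : List (Int × Int) :=
  if r ≤ row then gldAsc row (r + 1) (c + 1) (acc ++ [(r, c)]) else acc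
termination_by (row - r + 1).toNat
decreasing_by omega

def get_left_down_positions_alt (row : Int) (col : Int) : List (Int × Int) :=
  if row < 1 ∨ col < 1 then []
  else
    let n := min row col
    (gldAsc row (row - n + 1) (col - n + 1) []).reverse

-- ===== PRECONDITION & SPEC =====
def Spec_get_left_down_positions (row : Int) (col : Int) (out : List (Int × Int)) : Prop := out = get_left_down_positions_alt row col
instance (row : Int) (col : Int) (out : List (Int × Int)) : Decidable (Spec_get_left_down_positions row col out) := by unfold Spec_get_left_down_positions; infer_instance

-- ===== CLAIM (what is proved, stated in full; the proofs are below) =====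
def Claim_equal_get_left_down_positions : Prop := ∀ (row : Int) (col : Int), Dom_get_left_down_positions row col → Spec_get_left_down_positions row col (get_left_down_positions row col)

-- ===== LEMMAS AND PROOFS =====

theorem get_left_down_positions_closed (row col : Int) :
    get_left_down_positions row col
      = (List.range (min row col).toNat).map (fun k : Nat => (row - (k : Int), col - (k : Int))) := by
  fun_induction get_left_down_positions row col with
  | case1 row col h =>
      have : (min row col).toNat = 0 := by omega
      simp [this]
  | case2 row col h ih =>
      have hs : (min row col).toNat = (min (row - 1) (col - 1)).toNat + 1 := by omega
      rw [hs, List.range_succ_eq_map]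
      simp only [List.map_cons, List.map_map, ih]
      congr 1
      · simp
      apply List.map_congr_left
      intro k _
      simp only [Function.comp]
      refine Prod.ext ?_ ?_ <;> push_cast <;> ring

theorem gldAsc_closed (row : Int) (r c : Int) (acc : List (Int × Int)) :
    gldAsc row r c acc
      = acc ++ (List.range (row - r + 1).toNat).map (fun j : Nat => (r + (j : Int), c + (j : Int))) := by
  fun_induction gldAsc row r c acc with
  | case1 r c acc h ih =>
      rw [ih]
      have hs : (row - r + 1).toNat = (row - (r + 1) + 1).toNat + 1 := by omega
      rw [hs, List.range_succ_eq_map]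
      simp only [List.map_cons, List.map_map, List.append_assoc, List.singleton_append]
      congr 2
      · simp
      apply List.map_congr_left
      intro j _
      simp only [Function.comp]
      refine Prod.ext ?_ ?_ <;> push_cast <;> ring
  | case2 r c acc h =>
      have : (row - r + 1).toNat = 0 := by omega
      simp [this]

theorem get_left_down_positions_eq (row col : Int) :
    get_left_down_positions row col = get_left_down_positions_alt row col := by
  rw [get_left_down_positions_closed]
  unfold get_left_down_positions_alt
  by_cases h : row < 1 ∨ col < 1
  · have : (min row col).toNat = 0 := by omega
    simp [h, this]
  · simp only [h, if_false]
    rw [gldAsc_closed]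
    simp only [List.nil_append]
    have hn : (row - (row - min row col + 1) + 1).toNat = (min row col).toNat := by omega
    rw [hn]
    apply List.ext_getElem
    · simp
    · intro i h1 h2
      have hi : i < (min row col).toNat := by simpa using h1
      rw [List.getElem_reverse]
      simp only [List.getElem_map, List.getElem_range, List.length_map, List.length_range]
      have hmin : (0:Int) ≤ min row col := by omega
      refine Prod.ext ?_ ?_ <;> simp <;> omega

-- ===== VERDICT (by name: the statement is the Claim_ definition above) =====
theorem get_left_down_positions_spec : Claim_equal_get_left_down_positions := by
  intro row col _
  exact get_left_down_positions_eq row col
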